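-- pv_equiv track=rewrite | github.com/meetchen/Regional-variable-speed-limit-mode | Module/Wrvslm.py | find_nearest_camera
-- ===== SOURCE A (Python) =====
-- def find_nearest_camera(camera_num_list, message_boards_num_list):
--     """
--
--     :param camera_num_list: 摄像机的桩号列表
--     :param message_boards_num_list: 情报板的桩号列表
--     :return: 每个情报板距离最近的摄像机的数组下标
--     """
--     nearest_index_list = []
--     for message_board in message_boards_num_list:
--         min_distance = float('inf')
--         nearest_index = None
--         i = 0
--         for camera in camera_num_list:
--             distance = abs(camera - message_board)
--             if distance < min_distance:
--                 min_distance = distance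
--                 nearest_index = i
--             i += 1
--         nearest_index_list.append(nearest_index)
--     return nearest_index_list
-- ===== SOURCE B (Python) =====
-- def find_nearest_camera(camera_num_list, message_boards_num_list):
--     # Preprocess once: first-occurrence index per distinct camera value, plus the
--     # sorted distinct values; each board then binary-searches its two neighbouring
--     # values and takes the (distance, first index) lexicographic minimum of them.
--     first_idx = {}
--     i = 0
--     for c in camera_num_list:
--         if c not in first_idx:
--             first_idx[c] = i
--         i += 1
--     values = sorted(first_idx)
--     result = []
--     for board in message_boards_num_list:
--         if not values:
--             result.append(None)
--             continue
--         # hand-written bisect_left (no imports): least k with values[k] >= board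
--         lo, hi = 0, len(values)
--         while lo < hi:
--             mid = (lo + hi) // 2
--             if values[mid] < board:
--                 lo = mid + 1
--             else:
--                 hi = mid
--         cands = []
--         if lo > 0:
--             cands.append(values[lo - 1])
--         if lo < len(values):
--             cands.append(values[lo])
--         result.append(min((abs(v - board), first_idx[v]) for v in cands)[1])
--     return result
-- ===== Notes on version B (the rewrite author's own statement) =====
-- stated objective: faster
-- what changed: B preprocesses the cameras once into a first-occurrence index map and a sorted list of distinct values, then answers each board by binary search over the sorted values, comparing only the two neighbouring values by (distance, first index), instead of scanning all cameras per board.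
import Mathlib
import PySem

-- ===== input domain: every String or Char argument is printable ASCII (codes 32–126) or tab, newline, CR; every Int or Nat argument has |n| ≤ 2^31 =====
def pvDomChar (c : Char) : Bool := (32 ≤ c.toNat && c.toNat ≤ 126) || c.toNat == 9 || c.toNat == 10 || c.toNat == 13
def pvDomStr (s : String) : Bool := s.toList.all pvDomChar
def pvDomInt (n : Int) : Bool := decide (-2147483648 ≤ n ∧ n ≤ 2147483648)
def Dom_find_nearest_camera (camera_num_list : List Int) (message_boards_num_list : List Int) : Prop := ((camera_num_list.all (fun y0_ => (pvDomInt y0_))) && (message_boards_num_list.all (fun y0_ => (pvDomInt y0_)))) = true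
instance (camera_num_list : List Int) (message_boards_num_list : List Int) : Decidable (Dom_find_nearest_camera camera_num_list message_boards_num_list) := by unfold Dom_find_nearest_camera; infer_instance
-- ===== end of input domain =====

-- B preprocesses the cameras once (first-occurrence index map + sorted distinct values) and binary-searches each board's two neighbouring values; objective: faster (asymptotic).


-- ===== PORT A =====
-- float('inf') for min_distance is modeled as `none` in the first component
-- (any int distance compares < inf, i.e. the none branch always updates).
def fncInner (camera_num_list : List Int) (message_board : Int) : Option Int × Option Int × Int :=
  camera_num_list.foldl (fun (s : Option Int × Option Int × Int) camera =>
    let distance := |camera - message_board|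
    match s.1 with
    | none => (some distance, some s.2.2, s.2.2 + 1)
    | some m => if distance < m then (some distance, some s.2.2, s.2.2 + 1)
                else (s.1, s.2.1, s.2.2 + 1))
    (none, none, 0)

def find_nearest_camera (camera_num_list : List Int) (message_boards_num_list : List Int) : List (Option Int) :=
  message_boards_num_list.foldl
    (fun acc message_board => acc ++ [(fncInner camera_num_list message_board).2.1]) []

-- ===== PORT B =====
-- first_idx build loop: 'if c not in first_idx: first_idx[c] = i'
def fncBuild (camera_num_list : List Int) : PySem.Dict Int Int × Int :=
  camera_num_list.foldl (fun (st : PySem.Dict Int Int × Int) c =>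
    ((if st.1.contains c then st.1 else st.1.insert c st.2), st.2 + 1))
    (PySem.Dict.empty, 0)

-- per-board body of Source B's loop; the hand-written while-loop in Source B is verbatim
-- CPython's bisect_left, ported as PySem.List.bisectLeft (the same loop);
-- values[lo-1]/values[lo] are only read in range (getD default never used) and
-- first_idx[v] is only read on keys (get?.getD 0 exact there); min(...) over the
-- candidate (distance, index) tuples is PySem.List.min2? (Python tuple min).
def fncChoose (values : List Int) (first_idx : PySem.Dict Int Int) (board : Int) : Option Int :=
  if values.isEmpty then none
  else
    let lo := PySem.List.bisectLeft values board
    let cands := (if 0 < lo then [values.getD (lo - 1) 0] else []) ++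
                 (if lo < values.length then [values.getD lo 0] else [])
    (PySem.List.min2? (cands.map (fun v => (|v - board|, (first_idx.get? v).getD 0)))
        Prod.fst Prod.snd).map Prod.snd

def find_nearest_camera_alt (camera_num_list : List Int) (message_boards_num_list : List Int) : List (Option Int) :=
  let first_idx := (fncBuild camera_num_list).1
  let values := PySem.List.sorted first_idx.keys (fun x => x) false
  message_boards_num_list.foldl
    (fun acc board => acc ++ [fncChoose values first_idx board]) []

-- ===== PRECONDITION & SPEC =====
def Spec_find_nearest_camera (camera_num_list : List Int) (message_boards_num_list : List Int) (out : List (Option Int)) : Prop := out = find_nearest_camera_alt camera_num_list message_boards_num_list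
instance (camera_num_list : List Int) (message_boards_num_list : List Int) (out : List (Option Int)) : Decidable (Spec_find_nearest_camera camera_num_list message_boards_num_list out) := by unfold Spec_find_nearest_camera; infer_instance

-- ===== CLAIM (what is proved, stated in full; the proofs are below) =====
def Claim_equal_find_nearest_camera : Prop := ∀ (camera_num_list : List Int) (message_boards_num_list : List Int), Dom_find_nearest_camera camera_num_list message_boards_num_list → Spec_find_nearest_camera camera_num_list message_boards_num_list (find_nearest_camera camera_num_list message_boards_num_list)

-- ===== LEMMAS AND PROOFS =====

-- proof-side abbreviations for B's two preprocessed structures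
def fiOf (cams : List Int) : PySem.Dict Int Int := (fncBuild cams).1
def valsOf (cams : List Int) : List Int := PySem.List.sorted (fiOf cams).keys (fun x => x) false

-- "j is the index A's inner loop selects for board b": first index of minimal distance
def FirstMin (cams : List Int) (b : Int) (j : Nat) : Prop :=
  ∃ hj : j < cams.length,
    (∀ m (hm : m < cams.length), |cams[j] - b| ≤ |cams[m] - b|) ∧
    (∀ m (hm : m < cams.length), m < j → |cams[j] - b| < |cams[m] - b|)

theorem firstMin_unique {cams : List Int} {b : Int} {j j' : Nat}
    (h : FirstMin cams b j) (h' : FirstMin cams b j') : j = j' := by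
  obtain ⟨hj, hmin, hstrict⟩ := h
  obtain ⟨hj', hmin', hstrict'⟩ := h'
  by_contra hne
  rcases Nat.lt_or_ge j j' with hlt | hge
  · exact absurd (hmin j' hj') (not_le.mpr (hstrict' j hj hlt))
  · have hlt : j' < j := Nat.lt_of_le_of_ne hge (fun e => hne e.symm)
    exact absurd (hmin' j hj) (not_le.mpr (hstrict j' hj' hlt))

-- ===== A-side characterisation =====
def fncPairs (cams : List Int) (b : Int) (i : Int) : List (Int × Int) :=
  match cams with
  | [] => []
  | c :: cs => (|c - b|, i) :: fncPairs cs b (i + 1)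

def fncMinFold (l : List (Int × Int)) (s : Option (Int × Int)) : Option (Int × Int) :=
  l.foldl (fun best p =>
    match best with
    | none => some p
    | some q => if p.1 < q.1 then some p else some q) s

theorem fncPairs_length (b : Int) : ∀ (cams : List Int) (i : Int), (fncPairs cams b i).length = cams.length
  | [], _ => rfl
  | _ :: cs, i => by simp [fncPairs, fncPairs_length b cs (i + 1)]

theorem fncPairs_getElem (b : Int) : ∀ (cams : List Int) (i : Int) (m : Nat) (hm : m < cams.length),
    (fncPairs cams b i)[m]'(by rw [fncPairs_length]; exact hm) = (|cams[m] - b|, i + m)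
  | c :: cs, i, 0, _ => by simp [fncPairs]
  | c :: cs, i, m + 1, hm => by
      have := fncPairs_getElem b cs (i + 1) m (by simpa using Nat.lt_of_succ_lt_succ hm)
      simp [fncPairs, this]; ring

theorem inner_eq_minFold (b : Int) : ∀ (cams : List Int) (p : Option (Int × Int)) (i : Int),
    cams.foldl (fun (s : Option Int × Option Int × Int) camera =>
      let distance := |camera - b|
      match s.1 with
      | none => (some distance, some s.2.2, s.2.2 + 1)
      | some m => if distance < m then (some distance, some s.2.2, s.2.2 + 1)
                  else (s.1, s.2.1, s.2.2 + 1))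
      (p.map Prod.fst, p.map Prod.snd, i)
    = ((fncMinFold (fncPairs cams b i) p).map Prod.fst,
       (fncMinFold (fncPairs cams b i) p).map Prod.snd, i + cams.length)
  | [], p, i => by simp [fncPairs, fncMinFold]
  | c :: cs, p, i => by
      cases p with
      | none =>
          have h := inner_eq_minFold b cs (some (|c - b|, i)) (i + 1)
          simp only [Option.map_some] at h
          simp only [List.foldl_cons, Option.map_none]
          rw [show (fncPairs (c :: cs) b i) = (|c - b|, i) :: fncPairs cs b (i + 1) from rfl]
          simp only [fncMinFold, List.foldl_cons]
          rw [show (fncMinFold (fncPairs cs b (i + 1)) (some (|c - b|, i))) =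
                (fncPairs cs b (i + 1)).foldl (fun best p =>
                  match best with
                  | none => some p
                  | some q => if p.1 < q.1 then some p else some q) (some (|c - b|, i)) from rfl] at h
          refine Eq.trans (by exact h) ?_
          simp only [List.length_cons, Prod.mk.injEq]
          and_intros <;> first | trivial | (push_cast; ring)
      | some q =>
          by_cases hd : |c - b| < q.1
          · have h := inner_eq_minFold b cs (some (|c - b|, i)) (i + 1)
            simp only [Option.map_some] at h
            simp only [List.foldl_cons, Option.map_some]
            rw [show (fncPairs (c :: cs) b i) = (|c - b|, i) :: fncPairs cs b (i + 1) from rfl]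
            simp only [fncMinFold, List.foldl_cons, hd, if_pos]
            refine Eq.trans (by simpa [hd] using h) ?_
            simp only [List.length_cons, Prod.mk.injEq]
            and_intros <;> first | trivial | (push_cast; ring)
          · have h := inner_eq_minFold b cs (some q) (i + 1)
            simp only [Option.map_some] at h
            simp only [List.foldl_cons, Option.map_some]
            rw [show (fncPairs (c :: cs) b i) = (|c - b|, i) :: fncPairs cs b (i + 1) from rfl]
            simp only [fncMinFold, List.foldl_cons, hd]
            refine Eq.trans (by simpa [hd] using h) ?_
            simp only [List.length_cons, Prod.mk.injEq]
            and_intros <;> first | trivial | (push_cast; ring)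

theorem minFold_some : ∀ (l : List (Int × Int)) (p : Int × Int),
    ∃ r, fncMinFold l (some p) = some r ∧
      ((r = p ∧ ∀ m (hm : m < l.length), p.1 ≤ l[m].1) ∨
       (∃ (j : Nat) (hj : j < l.length), r = l[j] ∧ r.1 < p.1 ∧
          (∀ m (hm : m < l.length), r.1 ≤ l[m].1) ∧
          (∀ m (hm : m < l.length), m < j → r.1 < l[m].1)))
  | [], p => ⟨p, rfl, Or.inl ⟨rfl, by simp⟩⟩
  | x :: t, p => by
      by_cases hx : x.1 < p.1
      · obtain ⟨r, hr, hcase⟩ := minFold_some t x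
        refine ⟨r, ?_, Or.inr ?_⟩
        · simpa [fncMinFold, hx] using hr
        rcases hcase with ⟨rfl, hall⟩ | ⟨j, hj, rfl, hlt, hall, hstr⟩
        · refine ⟨0, by simp, by simp, hx, ?_, ?_⟩
          · intro m hm
            cases m with
            | zero => simp
            | succ m => simpa using hall m (by simpa using hm)
          · intro m hm hm0; omega
        · refine ⟨j + 1, by simpa using Nat.succ_lt_succ hj, by simp, lt_trans hlt hx, ?_, ?_⟩
          · intro m hm
            cases m with
            | zero => simpa using le_of_lt hlt
            | succ m => simpa using hall m (by simpa using hm)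
          · intro m hm hmj
            cases m with
            | zero => simpa using hlt
            | succ m => simpa using hstr m (by simpa using hm) (Nat.lt_of_succ_lt_succ hmj)
      · obtain ⟨r, hr, hcase⟩ := minFold_some t p
        refine ⟨r, ?_, ?_⟩
        · simpa [fncMinFold, hx] using hr
        rcases hcase with ⟨rfl, hall⟩ | ⟨j, hj, rfl, hlt, hall, hstr⟩
        · refine Or.inl ⟨rfl, ?_⟩
          intro m hm
          cases m with
          | zero => simpa using not_lt.mp hx
          | succ m => simpa using hall m (by simpa using hm)
        · refine Or.inr ⟨j + 1, by simpa using Nat.succ_lt_succ hj, by simp,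
            hlt, ?_, ?_⟩
          · intro m hm
            cases m with
            | zero => simpa using le_of_lt (lt_of_lt_of_le hlt (not_lt.mp hx))
            | succ m => simpa using hall m (by simpa using hm)
          · intro m hm hmj
            cases m with
            | zero => simpa using lt_of_lt_of_le hlt (not_lt.mp hx)
            | succ m => simpa using hstr m (by simpa using hm) (Nat.lt_of_succ_lt_succ hmj)

theorem minFold_none (l : List (Int × Int)) (hne : l ≠ []) :
    ∃ (j : Nat) (hj : j < l.length), fncMinFold l none = some l[j] ∧
      (∀ m (hm : m < l.length), l[j].1 ≤ l[m].1) ∧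
      (∀ m (hm : m < l.length), m < j → l[j].1 < l[m].1) := by
  obtain ⟨x, t, rfl⟩ := List.exists_cons_of_ne_nil hne
  obtain ⟨r, hr, hcase⟩ := minFold_some t x
  have hstep : fncMinFold (x :: t) none = fncMinFold t (some x) := by
    simp [fncMinFold]
  rcases hcase with ⟨rfl, hall⟩ | ⟨j, hj, rfl, hlt, hall, hstr⟩
  · refine ⟨0, by simp, by simpa [hstep] using hr, ?_, fun m hm h0 => by omega⟩
    intro m hm
    cases m with
    | zero => simp
    | succ m => simpa using hall m (by simpa using hm)
  · refine ⟨j + 1, by simpa using Nat.succ_lt_succ hj, by simpa [hstep] using hr, ?_, ?_⟩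
    · intro m hm
      cases m with
      | zero => simpa using le_of_lt hlt
      | succ m => simpa using hall m (by simpa using hm)
    · intro m hm hmj
      cases m with
      | zero => simpa using hlt
      | succ m => simpa using hstr m (by simpa using hm) (Nat.lt_of_succ_lt_succ hmj)

theorem A_firstMin (cams : List Int) (b : Int) (hne : cams ≠ []) :
    ∃ j : Nat, FirstMin cams b j ∧ (fncInner cams b).2.1 = some (j : Int) := by
  have h := inner_eq_minFold b cams none 0
  simp only [Option.map_none] at h
  have hpne : fncPairs cams b 0 ≠ [] := by
    cases cams with
    | nil => exact absurd rfl hne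
    | cons c cs => simp [fncPairs]
  obtain ⟨j, hj, hfold, hall, hstr⟩ := minFold_none (fncPairs cams b 0) hpne
  have hjlen : j < cams.length := by rwa [fncPairs_length] at hj
  have hget : ∀ m (hm : m < cams.length),
      (fncPairs cams b 0)[m]'(by rw [fncPairs_length]; exact hm) = (|cams[m] - b|, (m : Int)) := by
    intro m hm
    simpa using fncPairs_getElem b cams 0 m hm
  refine ⟨j, ⟨hjlen, ?_, ?_⟩, ?_⟩
  · intro m hm
    have := hall m (by rw [fncPairs_length]; exact hm)
    rwa [hget j hjlen, hget m hm] at this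
  · intro m hm hmj
    have := hstr m (by rw [fncPairs_length]; exact hm) hmj
    rwa [hget j hjlen, hget m hm] at this
  · have : (fncInner cams b).2.1 = (fncMinFold (fncPairs cams b 0) none).map Prod.snd := by
      unfold fncInner
      rw [h]
    rw [this, hfold, hget j hjlen]
    rfl

-- ===== B-side: dictionary build =====
theorem build_get? (v : Int) : ∀ (cams : List Int) (d : PySem.Dict Int Int) (i : Int),
    ((cams.foldl (fun (st : PySem.Dict Int Int × Int) c =>
        ((if st.1.contains c then st.1 else st.1.insert c st.2), st.2 + 1)) (d, i)).1).get? v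
    = (d.get? v).or ((PySem.List.index? cams v).map (fun n : Nat => i + (n : Int)))
  | [], d, i => by simp
  | c :: cs, d, i => by
      simp only [List.foldl_cons]
      by_cases hvc : v = c
      · subst hvc
        rw [PySem.List.index?_cons_self]
        by_cases hc : d.contains v = true
        · obtain ⟨w, hw⟩ : ∃ w, d.get? v = some w := by
            rw [PySem.Dict.contains_eq_isSome_get? d v] at hc
            exact Option.isSome_iff_exists.mp hc
          rw [if_pos hc, build_get? v cs d (i + 1), hw]
          simp
        · rw [if_neg hc, build_get? v cs (d.insert v i) (i + 1)]
          have hdn : d.get? v = none := by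
            rw [PySem.Dict.get?_eq_none_iff_contains d v]
            simpa using hc
          rw [PySem.Dict.get?_insert_self d v i, hdn]
          simp
      · rw [PySem.List.index?_cons_of_ne cs (Ne.symm hvc)]
        have hsame : ∀ d' : PySem.Dict Int Int,
            (if d.contains c then d else d.insert c i) = d' → d'.get? v = d.get? v := by
          intro d' hd'
          subst hd'
          split
          · rfl
          · exact PySem.Dict.get?_insert_of_ne d i hvc
        rw [build_get? v cs _ (i + 1), hsame _ rfl]
        cases hix : PySem.List.index? cs v with
        | none => simp
        | some n =>
            simp only [Option.map_some]
            congr 1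
            · congr 1
              push_cast
              ring

theorem build_keys : ∀ (cams : List Int) (d : PySem.Dict Int Int) (i : Int),
    ((cams.foldl (fun (st : PySem.Dict Int Int × Int) c =>
        ((if st.1.contains c then st.1 else st.1.insert c st.2), st.2 + 1)) (d, i)).1).keys
    = PySem.Set.update d.keys cams
  | [], d, i => by simp [PySem.Set.update]
  | c :: cs, d, i => by
      simp only [List.foldl_cons]
      have hupd : PySem.Set.update d.keys (c :: cs) = PySem.Set.update (PySem.Set.add d.keys c) cs := by
        simp [PySem.Set.update]
      rw [hupd]
      by_cases hc : d.contains c = true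
      · rw [if_pos hc, build_keys cs d (i + 1)]
        have hmem : c ∈ d.keys := (PySem.Dict.contains_iff_mem_keys d c).mp hc
        have : PySem.Set.add d.keys c = d.keys := by
          simp [PySem.Set.add, PySem.Set.contains, hmem]
        rw [this]
      · rw [if_neg hc, build_keys cs (d.insert c i) (i + 1)]
        have hk : (d.insert c i).keys = d.keys ++ [c] :=
          PySem.Dict.keys_insert_of_not_contains d i (by simpa using hc)
        have hnm : c ∉ d.keys := fun hm => hc ((PySem.Dict.contains_iff_mem_keys d c).mpr hm)
        have : PySem.Set.add d.keys c = d.keys ++ [c] := by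
          simp [PySem.Set.add, PySem.Set.contains, hnm]
        rw [hk, this]

theorem fiOf_get? (cams : List Int) (v : Int) :
    (fiOf cams).get? v = (PySem.List.index? cams v).map (fun n : Nat => (n : Int)) := by
  unfold fiOf fncBuild
  rw [build_get? v cams PySem.Dict.empty 0]
  simp

theorem keys_fiOf (cams : List Int) : (fiOf cams).keys = PySem.Set.ofList cams := by
  unfold fiOf fncBuild
  rw [build_keys cams PySem.Dict.empty 0]
  simp [PySem.Set.update, PySem.Set.ofList, PySem.Dict.keys_empty]

theorem mem_valsOf (cams : List Int) (v : Int) : v ∈ valsOf cams ↔ v ∈ cams := by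
  unfold valsOf
  rw [PySem.List.mem_sorted, keys_fiOf]
  exact PySem.Set.mem_ofList cams v

theorem valsOf_sorted (cams : List Int) : (valsOf cams).Pairwise (· ≤ ·) :=
  PySem.List.sorted_pairwise (fiOf cams).keys (fun x => x)

-- ===== B-side: the chosen candidate is the first minimum =====
-- shared criterion: any winner of the candidate comparison is A's first minimum
theorem firstMin_of_winner (cams : List Int) (b : Int) (vals : List Int)
    (hmm : ∀ v, v ∈ vals ↔ v ∈ cams) (hsort : vals.Pairwise (· ≤ ·))
    (k : Nat) (hk : k ≤ vals.length)
    (hlt : ∀ t (ht : t < vals.length), t < k → vals[t] < b)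
    (hge : ∀ t (ht : t < vals.length), k ≤ t → b ≤ vals[t])
    (cands : List Int)
    (hpred : ∀ h : 0 < k, vals[k - 1]'(by omega) ∈ cands)
    (hsucc : ∀ h : k < vals.length, vals[k]'h ∈ cands)
    (vstar : Int) (jstar : Nat) (hjlen : jstar < cams.length)
    (hv : cams[jstar] = vstar)
    (hdist : ∀ c ∈ cands, |vstar - b| ≤ |c - b|)
    (hlex : ∀ c ∈ cands, |c - b| = |vstar - b| →
        ∀ n, PySem.List.index? cams c = some n → jstar ≤ n) :
    FirstMin cams b jstar := by
  have hmono : ∀ (t t' : Nat) (ht : t < vals.length) (ht' : t' < vals.length),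
      t ≤ t' → vals[t] ≤ vals[t'] := by
    intro t t' ht ht' hle
    rcases Nat.lt_or_ge t t' with h | h
    · exact List.pairwise_iff_getElem.mp hsort t t' ht ht' h
    · have : t = t' := le_antisymm hle h
      subst this; exact le_refl _
  -- the central distance bound, with the tie analysis
  have key : ∀ m (hm : m < cams.length),
      |vstar - b| ≤ |cams[m] - b| ∧
      (|cams[m] - b| = |vstar - b| → cams[m] ∈ cands) := by
    intro m hm
    have hcm : cams[m] ∈ vals := (hmm cams[m]).mpr (List.getElem_mem hm)
    obtain ⟨t, ht, hteq⟩ := List.mem_iff_getElem.mp hcm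
    rw [← hteq]
    rcases Nat.lt_or_ge t k with htk | htk
    · -- vals[t] lies below b: compare with the predecessor vals[k-1]
      have h0k : 0 < k := by omega
      have hkm1 : k - 1 < vals.length := by omega
      have hple : vals[t] ≤ vals[k - 1] := hmono t (k - 1) ht hkm1 (by omega)
      have hpb : vals[k - 1] < b := hlt (k - 1) hkm1 (by omega)
      have htb : vals[t] < b := hlt t ht htk
      have hdp : |vstar - b| ≤ |vals[k - 1] - b| := hdist _ (hpred h0k)
      have habs : |vals[k - 1] - b| = b - vals[k - 1] := by
        rw [abs_sub_comm]; exact abs_of_nonneg (by omega)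
      have habs2 : |vals[t] - b| = b - vals[t] := by
        rw [abs_sub_comm]; exact abs_of_nonneg (by omega)
      constructor
      · rw [habs2]; linarith
      · intro heq
        have : vals[t] = vals[k - 1] := by
          rw [habs2] at heq; linarith
        rw [this]; exact hpred h0k
    · -- vals[t] lies at or above b: compare with the successor vals[k]
      have hkl : k < vals.length := by omega
      have hsle : vals[k] ≤ vals[t] := hmono k t hkl ht htk
      have hbs : b ≤ vals[k] := hge k hkl (le_refl k)
      have hds : |vstar - b| ≤ |vals[k] - b| := hdist _ (hsucc hkl)
      have habs : |vals[k] - b| = vals[k] - b := abs_of_nonneg (by omega)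
      have habs2 : |vals[t] - b| = vals[t] - b := abs_of_nonneg (by omega)
      constructor
      · rw [habs2]; linarith
      · intro heq
        have : vals[t] = vals[k] := by
          rw [habs2] at heq; linarith
        rw [this]; exact hsucc hkl
  refine ⟨hjlen, ?_, ?_⟩
  · intro m hm
    rw [hv]
    exact (key m hm).1
  · intro m hm hmj
    rw [hv]
    rcases lt_or_eq_of_le ((key m hm).1) with h | h
    · exact h
    · exfalso
      have hc : cams[m] ∈ cands := (key m hm).2 h.symm
      obtain ⟨n, hn⟩ := Option.isSome_iff_exists.mp
        ((PySem.List.index?_isSome_iff cams cams[m]).mpr (List.getElem_mem hm))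
      have hjn : jstar ≤ n := hlex cams[m] hc h.symm n hn
      obtain ⟨hnlen, hcn, hfirst⟩ := PySem.List.getElem_of_index?_eq_some hn
      have hnm : n ≤ m := by
        by_contra hcon
        exact hfirst m (by omega) rfl
      omega

theorem min2?_singleton (x : Int × Int) : PySem.List.min2? [x] Prod.fst Prod.snd = some x := by
  simp [PySem.List.min2?]

theorem min2?_pair (x y : Int × Int) :
    PySem.List.min2? [x, y] Prod.fst Prod.snd =
      some (if y.1 < x.1 ∨ (y.1 ≤ x.1 ∧ y.2 < x.2) then y else x) := by
  simp only [PySem.List.min2?, List.foldl_cons, List.foldl_nil]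
  split_ifs with h1 h2 <;> simp_all

-- index data of a value that occurs in cams
theorem idx_data (cams : List Int) (v : Int) (hv : v ∈ cams) :
    ∃ n : Nat, PySem.List.index? cams v = some n ∧ (fiOf cams).get? v = some (n : Int) ∧
      ∃ hn : n < cams.length, cams[n] = v := by
  obtain ⟨n, hn⟩ := Option.isSome_iff_exists.mp
    ((PySem.List.index?_isSome_iff cams v).mpr hv)
  obtain ⟨hnl, hcn, _⟩ := PySem.List.getElem_of_index?_eq_some hn
  exact ⟨n, hn, by rw [fiOf_get?, hn]; rfl, hnl, hcn⟩

theorem fncChoose_eq (vals : List Int) (fi : PySem.Dict Int Int) (b : Int)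
    (h : vals ≠ []) :
    fncChoose vals fi b =
      (PySem.List.min2?
        (((if 0 < PySem.List.bisectLeft vals b then
              [vals.getD (PySem.List.bisectLeft vals b - 1) 0] else []) ++
          (if PySem.List.bisectLeft vals b < vals.length then
              [vals.getD (PySem.List.bisectLeft vals b) 0] else [])).map
          (fun v => (|v - b|, (fi.get? v).getD 0)))
        Prod.fst Prod.snd).map Prod.snd := by
  unfold fncChoose
  rw [if_neg (by simp [h])]

theorem B_firstMin (cams : List Int) (b : Int) (hne : cams ≠ []) :
    ∃ j : Nat, FirstMin cams b j ∧ fncChoose (valsOf cams) (fiOf cams) b = some (j : Int) := by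
  have hvne : valsOf cams ≠ [] := by
    obtain ⟨c0, cs, rfl⟩ := List.exists_cons_of_ne_nil hne
    exact List.ne_nil_of_mem ((mem_valsOf _ c0).mpr (List.mem_cons_self))
  have hvpos : 0 < (valsOf cams).length := List.length_pos_of_ne_nil hvne
  obtain ⟨hk, hltk, hgek⟩ := PySem.List.bisectLeft_spec (valsOf cams) b (valsOf_sorted cams)
  rw [fncChoose_eq _ _ _ hvne]
  set vals := valsOf cams with hvals
  set k := PySem.List.bisectLeft vals b with hkdef
  have hwin : ∀ (cands : List Int)
      (hpred : ∀ h : 0 < k, vals[k - 1]'(by omega) ∈ cands)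
      (hsucc : ∀ h : k < vals.length, vals[k]'h ∈ cands)
      (vstar : Int) (hvc : vstar ∈ cands)
      (hdist : ∀ c ∈ cands, |vstar - b| ≤ |c - b|)
      (hsub : ∀ c ∈ cands, c ∈ vals)
      (hlex : ∀ c ∈ cands, |c - b| = |vstar - b| →
          ∀ n nstar, PySem.List.index? cams c = some n →
            PySem.List.index? cams vstar = some nstar → nstar ≤ n),
      ∃ j : Nat, FirstMin cams b j ∧ PySem.List.index? cams vstar = some j := by
    intro cands hpred hsucc vstar hvc hdist hsub hlex
    have hvmem : vstar ∈ cams := (mem_valsOf cams vstar).mp (hsub vstar hvc)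
    obtain ⟨n, hn, hget, hnl, hcn⟩ := idx_data cams vstar hvmem
    refine ⟨n, ?_, hn⟩
    refine firstMin_of_winner cams b vals (fun v => mem_valsOf cams v) (valsOf_sorted cams)
      k hk hltk hgek cands hpred hsucc vstar n hnl hcn hdist ?_
    intro c hc hdc m hm
    exact hlex c hc hdc m n hm hn
  rcases Nat.eq_zero_or_pos k with hk0 | hkpos
  · -- k = 0 : only the successor vals[k] is a candidate
    have hklen : k < vals.length := by omega
    obtain ⟨j, hFM, hidx⟩ := hwin [vals[k]]
      (fun h => by omega) (fun h => List.mem_singleton.mpr rfl) vals[k]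
      (List.mem_singleton.mpr rfl)
      (fun c hc => by rw [List.mem_singleton.mp hc])
      (fun c hc => by rw [List.mem_singleton.mp hc]; exact List.getElem_mem hklen)
      (fun c hc hdc m nst hm hnst => by
        rw [List.mem_singleton.mp hc] at hm
        rw [hm] at hnst
        simp only [Option.some.injEq] at hnst
        omega)
    refine ⟨j, hFM, ?_⟩
    have hget : (fiOf cams).get? vals[k] = some (j : Int) := by
      rw [fiOf_get?, hidx]; rfl
    rw [if_neg (by omega), if_pos hklen]
    simp only [List.nil_append, List.map_cons, List.map_nil]
    rw [List.getD_eq_getElem vals 0 hklen, hget, min2?_singleton]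
    rfl
  · rcases Nat.lt_or_ge k vals.length with hklen | hkge
    · -- 0 < k < len : both neighbours are candidates
      have hkm1 : k - 1 < vals.length := by omega
      obtain ⟨np, hnp, hgetp, hnpl, hcnp⟩ :=
        idx_data cams vals[k - 1] ((mem_valsOf cams _).mp (List.getElem_mem hkm1))
      obtain ⟨ns, hns, hgets, hnsl, hcns⟩ :=
        idx_data cams vals[k] ((mem_valsOf cams _).mp (List.getElem_mem hklen))
      rw [if_pos hkpos, if_pos hklen]
      simp only [List.cons_append, List.nil_append, List.map_cons, List.map_nil]
      rw [List.getD_eq_getElem vals 0 hkm1, List.getD_eq_getElem vals 0 hklen, hgetp, hgets]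
      simp only [Option.getD_some]
      rw [min2?_pair]
      by_cases hcond : |vals[k] - b| < |vals[k - 1] - b| ∨
          (|vals[k] - b| ≤ |vals[k - 1] - b| ∧ ((ns : Int)) < ((np : Int)))
      · -- the successor wins
        obtain ⟨j, hFM, hidx⟩ := hwin [vals[k - 1], vals[k]]
          (fun h => List.mem_cons_self) (fun h => List.mem_cons_of_mem _ (List.mem_singleton.mpr rfl))
          vals[k] (List.mem_cons_of_mem _ (List.mem_singleton.mpr rfl))
          (fun c hc => by
            rcases List.mem_cons.mp hc with rfl | hc'
            · rcases hcond with h | ⟨h, _⟩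
              · exact le_of_lt h
              · exact h
            · rw [List.mem_singleton.mp hc'])
          (fun c hc => by
            rcases List.mem_cons.mp hc with rfl | hc'
            · exact List.getElem_mem hkm1
            · rw [List.mem_singleton.mp hc']; exact List.getElem_mem hklen)
          (fun c hc hdc m nst hm hnst => by
            rw [hns] at hnst
            simp only [Option.some.injEq] at hnst
            subst hnst
            rcases List.mem_cons.mp hc with rfl | hc'
            · rw [hnp] at hm
              simp only [Option.some.injEq] at hm
              subst hm
              rcases hcond with h | ⟨_, h⟩
              · exact absurd hdc (by omega)
              · omega
            · rw [List.mem_singleton.mp hc'] at hm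
              rw [hns] at hm
              simp only [Option.some.injEq] at hm
              omega)
        have hj : ns = j := by
          rw [hns] at hidx
          simpa using hidx
        refine ⟨j, hFM, ?_⟩
        rw [if_pos hcond]
        simp [hj]
      · -- the predecessor wins
        push Not at hcond
        obtain ⟨hdple, himp⟩ := hcond
        obtain ⟨j, hFM, hidx⟩ := hwin [vals[k - 1], vals[k]]
          (fun h => List.mem_cons_self) (fun h => List.mem_cons_of_mem _ (List.mem_singleton.mpr rfl))
          (vals[k - 1]) List.mem_cons_self
          (fun c hc => by
            rcases List.mem_cons.mp hc with rfl | hc'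
            · exact le_refl _
            · rw [List.mem_singleton.mp hc']; exact hdple)
          (fun c hc => by
            rcases List.mem_cons.mp hc with rfl | hc'
            · exact List.getElem_mem hkm1
            · rw [List.mem_singleton.mp hc']; exact List.getElem_mem hklen)
          (fun c hc hdc m nst hm hnst => by
            rw [hnp] at hnst
            simp only [Option.some.injEq] at hnst
            subst hnst
            rcases List.mem_cons.mp hc with rfl | hc'
            · rw [hnp] at hm
              simp only [Option.some.injEq] at hm
              omega
            · rw [List.mem_singleton.mp hc'] at hm hdc
              rw [hns] at hm
              simp only [Option.some.injEq] at hm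
              subst hm
              have := himp (le_of_eq hdc)
              omega)
        have hj : np = j := by
          rw [hnp] at hidx
          simpa using hidx
        refine ⟨j, hFM, ?_⟩
        rw [if_neg ?_]
        · simp [hj]
        · push Not
          exact ⟨hdple, himp⟩
    · -- k = len : only the predecessor is a candidate
      have hkeq : k = vals.length := le_antisymm hk hkge
      have hkm1 : k - 1 < vals.length := by omega
      obtain ⟨j, hFM, hidx⟩ := hwin [vals[k - 1]]
        (fun h => List.mem_singleton.mpr rfl) (fun h => by omega) (vals[k - 1])
        (List.mem_singleton.mpr rfl)
        (fun c hc => by rw [List.mem_singleton.mp hc])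
        (fun c hc => by rw [List.mem_singleton.mp hc]; exact List.getElem_mem hkm1)
        (fun c hc hdc m nst hm hnst => by
          rw [List.mem_singleton.mp hc] at hm
          rw [hm] at hnst
          simp only [Option.some.injEq] at hnst
          omega)
      refine ⟨j, hFM, ?_⟩
      have hget : (fiOf cams).get? vals[k - 1] = some (j : Int) := by
        rw [fiOf_get?, hidx]; rfl
      rw [if_pos hkpos, if_neg (by omega)]
      simp only [List.append_nil, List.map_cons, List.map_nil]
      rw [List.getD_eq_getElem vals 0 hkm1, hget, min2?_singleton]
      rfl

theorem choose_eq_inner (cams : List Int) (b : Int) :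
    (fncInner cams b).2.1 = fncChoose (valsOf cams) (fiOf cams) b := by
  rcases eq_or_ne cams [] with rfl | hne
  · have hvals : valsOf ([] : List Int) = [] := by decide
    simp [fncInner, fncChoose, hvals]
  · obtain ⟨j, hA, hAe⟩ := A_firstMin cams b hne
    obtain ⟨j', hB, hBe⟩ := B_firstMin cams b hne
    rw [hAe, hBe, firstMin_unique hA hB]

-- ===== VERDICT (by name: the statement is the Claim_ definition above) =====
theorem find_nearest_camera_spec : Claim_equal_find_nearest_camera := by
  intro cams boards _
  unfold Spec_find_nearest_camera find_nearest_camera find_nearest_camera_alt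
  rw [PySem.List.foldl_append_singleton_eq_map, PySem.List.foldl_append_singleton_eq_map]
  simp only [List.nil_append]
  exact List.map_congr_left (fun b _ => by
    simpa [fncInner] using choose_eq_inner cams b)
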